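-- pv_equiv track=rewrite | github.com/bftaylor98/engdashboard | reference projects/SQL_Probe/under_minimum_reporting/test_under_minimum_report.py | parse_part_number
-- ===== SOURCE A (Python) =====
-- PART_NUMBER_LINKS = {
--     'OSG': lambda suffix: f"https://osgtool.com/{suffix}",
--     'ALLI': lambda suffix: f"https://www.alliedmachine.com/PRODUCTS/ItemDetail.aspx?item={suffix}",
--     'GARR': lambda suffix: f"https://www.garrtool.com/product-details/?EDP={suffix}",
--     'GUHR': lambda suffix: f"https://guhring.com/ProductsServices/SizeDetails?EDP={suffix}",
--     'HARV': lambda suffix: f"https://www.harveytool.com/products/tool-details-{suffix}",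
--     'INGE': lambda suffix: f"https://www.ingersoll-imc.com/product/{suffix}",
-- }
--
-- def parse_part_number(part_no: str) -> tuple:
--     """Parse a part number to extract company prefix and suffix."""
--     if not part_no or not part_no.strip():
--         return None, None
--
--     part_no = part_no.strip()
--
--     for prefix, url_func in PART_NUMBER_LINKS.items():
--         prefix_with_hyphen = f"{prefix}-"
--         if part_no.upper().startswith(prefix_with_hyphen.upper()):
--             suffix = part_no[len(prefix_with_hyphen):].strip()
--             if suffix:
--                 return prefix, suffix
--
--     return None, None
-- ===== SOURCE B (Python) =====
-- PART_NUMBER_LINKS = {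
--     'OSG': lambda suffix: f"https://osgtool.com/{suffix}",
--     'ALLI': lambda suffix: f"https://www.alliedmachine.com/PRODUCTS/ItemDetail.aspx?item={suffix}",
--     'GARR': lambda suffix: f"https://www.garrtool.com/product-details/?EDP={suffix}",
--     'GUHR': lambda suffix: f"https://guhring.com/ProductsServices/SizeDetails?EDP={suffix}",
--     'HARV': lambda suffix: f"https://www.harveytool.com/products/tool-details-{suffix}",
--     'INGE': lambda suffix: f"https://www.ingersoll-imc.com/product/{suffix}",
-- }
--
--
-- def parse_part_number(part_no: str) -> tuple:
--     """Parse a part number to extract company prefix and suffix."""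
--     head, sep, tail = part_no.strip().partition('-')
--     key = head.upper()
--     if sep and key in PART_NUMBER_LINKS:
--         suffix = tail.strip()
--         if suffix:
--             return key, suffix
--     return None, None
-- ===== Notes on version B (the rewrite author's own statement) =====
-- stated objective: simpler
-- what changed: Replaces the scan over all six prefixes with startswith/slice per prefix by a single str.partition at the hyphen that computes the head once, followed by one dict membership test on the uppercased head.
import Mathlib
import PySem

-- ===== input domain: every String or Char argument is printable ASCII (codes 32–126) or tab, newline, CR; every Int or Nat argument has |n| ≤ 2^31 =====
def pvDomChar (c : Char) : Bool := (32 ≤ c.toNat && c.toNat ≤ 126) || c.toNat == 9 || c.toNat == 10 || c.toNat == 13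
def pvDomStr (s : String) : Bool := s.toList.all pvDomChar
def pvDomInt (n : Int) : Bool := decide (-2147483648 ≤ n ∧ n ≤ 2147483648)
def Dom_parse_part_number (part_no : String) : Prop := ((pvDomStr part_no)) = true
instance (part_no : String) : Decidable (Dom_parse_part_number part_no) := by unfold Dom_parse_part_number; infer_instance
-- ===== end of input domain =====

-- B replaces A's scan over all six prefixes by one str.partition at the hyphen, plus a single key-membership test (simpler, same results).

-- B replaces A's scan over all six prefixes (startswith + slice per prefix) by one str.partition at the hyphen,
-- computing the head once, followed by a single key-membership test; same return values.

-- ===== PORT A =====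
-- keys of PART_NUMBER_LINKS in insertion order (the URL lambdas are never used by parse_part_number)
def PART_NUMBER_LINKS_keys : List (List Char) :=
  ["OSG".toList, "ALLI".toList, "GARR".toList, "GUHR".toList, "HARV".toList, "INGE".toList]

-- the `for prefix, url_func in PART_NUMBER_LINKS.items():` loop of A (pw = prefix+'-', suffix inlined)
def parseLoop : List (List Char) → List Char → Option String × Option String
  | [], _ => (none, none)
  | p :: rest, cs =>
    if PySem.Chars.startswith (PySem.Chars.upper cs) (PySem.Chars.upper (p ++ ['-'])) then
      if (PySem.Chars.strip (cs.drop (p ++ ['-']).length)).isEmpty then parseLoop rest cs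
      else (some (String.ofList p), some (String.ofList (PySem.Chars.strip (cs.drop (p ++ ['-']).length))))
    else parseLoop rest cs

def parse_part_number (part_no : String) : Option String × Option String :=
  if part_no.toList.isEmpty || (PySem.Chars.strip part_no.toList).isEmpty then (none, none)
  else parseLoop PART_NUMBER_LINKS_keys (PySem.Chars.strip part_no.toList)

-- ===== PORT B =====
-- Source B: head, sep, tail = part_no.strip().partition at the hyphen — partition with a one-char separator is
-- ported by hand, exactly: head = takeWhile (≠ '-'), the remainder (starting at the separator, [] if
-- absent) = dropWhile (≠ '-'); key = head.upper(); then one membership test in the dict's keys.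
def parse_part_number_alt (part_no : String) : Option String × Option String :=
  match (PySem.Chars.strip part_no.toList).dropWhile (· ≠ '-') with
  | [] => (none, none)
  | _ :: tail =>
    if PySem.Chars.upper ((PySem.Chars.strip part_no.toList).takeWhile (· ≠ '-')) ∈
        PART_NUMBER_LINKS_keys then
      if (PySem.Chars.strip tail).isEmpty then (none, none)
      else
        (some (String.ofList
            (PySem.Chars.upper ((PySem.Chars.strip part_no.toList).takeWhile (· ≠ '-')))),
         some (String.ofList (PySem.Chars.strip tail)))
    else (none, none)

-- ===== PRECONDITION & SPEC =====
def Spec_parse_part_number (part_no : String) (out : Option String × Option String) : Prop := out = parse_part_number_alt part_no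
instance (part_no : String) (out : Option String × Option String) : Decidable (Spec_parse_part_number part_no out) := by unfold Spec_parse_part_number; infer_instance

-- ===== CLAIM (what is proved, stated in full; the proofs are below) =====
def Claim_equal_parse_part_number : Prop := ∀ (part_no : String), Dom_parse_part_number part_no → Spec_parse_part_number part_no (parse_part_number part_no)

-- ===== LEMMAS AND PROOFS =====

theorem charOfNat_toNat (n : Nat) (hn : n.isValidChar) : (Char.ofNat n).toNat = n := by
  rw [Char.ofNat, dif_pos hn]
  simp [Char.ofNatAux, Char.toNat]

theorem upperChar_eq_dash_iff (c : Char) : (PySem.Chars.upperChar c = '-') ↔ c = '-' := by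
  unfold PySem.Chars.upperChar PySem.Chars.islower
  have h97 : ('a' ≤ c) ↔ 97 ≤ c.toNat := ge_iff_le
  have h122 : (c ≤ 'z') ↔ c.toNat ≤ 122 := Iff.rfl
  by_cases h : 97 ≤ c.toNat ∧ c.toNat ≤ 122
  · rw [if_pos (by simp [h97, h122, h.1, h.2])]
    have hv : (Char.ofNat (c.toNat - 32)).toNat = c.toNat - 32 :=
      charOfNat_toNat _ (Or.inl (by omega))
    constructor
    · intro he
      have := congrArg Char.toNat he
      rw [hv] at this
      exact absurd this (by change ¬ (c.toNat - 32 = 45); omega)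
    · intro he; subst he; revert h; decide
  · rw [if_neg (by simp [h97, h122]; omega)]

theorem startswith_upper (p : List Char) (hp : ('-' : Char) ∉ p) (cs : List Char) :
    PySem.Chars.startswith (PySem.Chars.upper cs) (p ++ ['-']) = true ↔
      (PySem.Chars.upper (cs.takeWhile (· ≠ '-')) = p ∧ cs.dropWhile (· ≠ '-') ≠ []) := by
  rw [PySem.Chars.startswith_iff]
  induction p generalizing cs with
  | nil =>
    cases cs with
    | nil => simp [PySem.Chars.upper]
    | cons c cs' =>
      by_cases hc : c = '-'
      · subst hc
        simp [PySem.Chars.upper, List.cons_prefix_cons]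
        decide
      · have h2 : ¬ ('-' = PySem.Chars.upperChar c) :=
          fun h => hc ((upperChar_eq_dash_iff c).mp h.symm)
        simp [PySem.Chars.upper, List.cons_prefix_cons, hc, h2]
  | cons a p' ih =>
    have ha : a ≠ '-' := fun h => hp (h ▸ List.mem_cons_self)
    have hp' : ('-' : Char) ∉ p' := fun h => hp (List.mem_cons_of_mem _ h)
    cases cs with
    | nil => simp [PySem.Chars.upper]
    | cons c cs' =>
      have ihc := ih hp' cs'
      by_cases hc : c = '-'
      · subst hc
        have h1 : PySem.Chars.upperChar '-' = '-' := by decide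
        simp [PySem.Chars.upper, List.cons_prefix_cons, h1, ha]
      · rw [List.takeWhile_cons, if_pos (by simp [hc]), List.dropWhile_cons,
           if_pos (by simp [hc])]
        simp only [PySem.Chars.upper, List.map_cons, List.cons_append, List.cons_prefix_cons,
          List.cons.injEq]
        constructor
        · rintro ⟨hab, hpre⟩
          obtain ⟨h1, h2⟩ := ihc.mp hpre
          exact ⟨⟨hab.symm, h1⟩, h2⟩
        · rintro ⟨⟨hab, h1⟩, h2⟩
          exact ⟨hab.symm, ihc.mpr ⟨h1, h2⟩⟩

theorem drop_len_eq_tail (cs p : List Char)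
    (h : PySem.Chars.upper (cs.takeWhile (· ≠ '-')) = p) :
    cs.drop (p.length + 1) = (cs.dropWhile (· ≠ '-')).tail := by
  have hl : (cs.takeWhile (· ≠ '-')).length = p.length := by
    rw [← h]; simp [PySem.Chars.upper]
  conv_lhs => rw [← List.takeWhile_append_dropWhile (p := (· ≠ '-')) (l := cs)]
  rw [← hl, ← List.drop_drop, List.drop_left, List.drop_one]

theorem parseLoop_eq (keys : List (List Char)) (cs : List Char)
    (hkeys : ∀ p ∈ keys, ('-' : Char) ∉ p ∧ PySem.Chars.upper (p ++ ['-']) = p ++ ['-']) :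
    parseLoop keys cs =
      if PySem.Chars.upper (cs.takeWhile (· ≠ '-')) ∈ keys ∧ cs.dropWhile (· ≠ '-') ≠ [] ∧
          PySem.Chars.strip ((cs.dropWhile (· ≠ '-')).tail) ≠ [] then
        (some (String.ofList (PySem.Chars.upper (cs.takeWhile (· ≠ '-')))),
         some (String.ofList (PySem.Chars.strip ((cs.dropWhile (· ≠ '-')).tail))))
      else (none, none) := by
  induction keys with
  | nil => simp [parseLoop]
  | cons p rest ih =>
    obtain ⟨hpd, hpu⟩ := hkeys p List.mem_cons_self
    have ihr := ih (fun q hq => hkeys q (List.mem_cons_of_mem _ hq))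
    show (if PySem.Chars.startswith (PySem.Chars.upper cs) (PySem.Chars.upper (p ++ ['-'])) then _ else _) = _
    rw [hpu]
    by_cases hc : (PySem.Chars.upper (cs.takeWhile (· ≠ '-')) = p ∧ cs.dropWhile (· ≠ '-') ≠ [])
    · rw [if_pos ((startswith_upper p hpd cs).mpr hc)]
      have hdrop : cs.drop ((p ++ ['-']).length) = (cs.dropWhile (· ≠ '-')).tail := by
        simpa using drop_len_eq_tail cs p hc.1
      rw [hdrop]
      by_cases hs : PySem.Chars.strip ((cs.dropWhile (· ≠ '-')).tail) = []
      · rw [if_pos (by simpa using hs), ihr, if_neg (fun h => h.2.2 hs), if_neg (fun h => h.2.2 hs)]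
      · rw [if_neg (by simpa using hs),
          if_pos ⟨by rw [hc.1]; exact List.mem_cons_self, hc.2, hs⟩, hc.1]
    · rw [if_neg (fun hb => hc ((startswith_upper p hpd cs).mp hb)), ihr]
      by_cases htp : PySem.Chars.upper (cs.takeWhile (· ≠ '-')) = p
      · have hd0 : cs.dropWhile (· ≠ '-') = [] := by
          by_contra hne; exact hc ⟨htp, hne⟩
        rw [if_neg (fun h => h.2.1 hd0), if_neg (fun h => h.2.1 hd0)]
      · have hmem : (PySem.Chars.upper (cs.takeWhile (· ≠ '-')) ∈ p :: rest) ↔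
            (PySem.Chars.upper (cs.takeWhile (· ≠ '-')) ∈ rest) := by
          rw [List.mem_cons]
          exact ⟨fun h => h.resolve_left htp, Or.inr⟩
        exact (if_congr (and_congr hmem Iff.rfl) rfl rfl).symm

theorem parse_eq_alt (part_no : String) :
    parse_part_number part_no = parse_part_number_alt part_no := by
  unfold parse_part_number parse_part_number_alt
  have hkeys : ∀ p ∈ PART_NUMBER_LINKS_keys,
      ('-' : Char) ∉ p ∧ PySem.Chars.upper (p ++ ['-']) = p ++ ['-'] := by decide
  by_cases h0 : PySem.Chars.strip part_no.toList = []
  · rw [if_pos (by simp [h0]), h0]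
    rfl
  · have h1 : part_no.toList ≠ [] := fun h => h0 (by rw [h]; rfl)
    rw [if_neg (by simp [h1, h0]), parseLoop_eq _ _ hkeys]
    cases hd : (PySem.Chars.strip part_no.toList).dropWhile (· ≠ '-') with
    | nil => rw [if_neg (fun h => h.2.1 rfl)]
    | cons x tail =>
      simp only [List.tail_cons]
      by_cases hk : PySem.Chars.upper ((PySem.Chars.strip part_no.toList).takeWhile (· ≠ '-')) ∈
          PART_NUMBER_LINKS_keys
      · by_cases hs : PySem.Chars.strip tail = []
        · rw [if_neg (fun h => h.2.2 hs), if_pos hk, if_pos (by simpa using hs)]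
        · rw [if_pos ⟨hk, by simp, hs⟩, if_pos hk, if_neg (by simpa using hs)]
      · rw [if_neg (fun h => hk h.1), if_neg hk]

-- ===== VERDICT (by name: the statement is the Claim_ definition above) =====
theorem parse_part_number_spec : Claim_equal_parse_part_number := by
  intro part_no _
  unfold Spec_parse_part_number
  exact parse_eq_alt part_no
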